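-- pv_equiv track=rewrite | github.com/blzzua/codewars | 7-kyu/plastic_balance.py | plastic_balance
-- ===== SOURCE A (Python) =====
-- def plastic_balance(lst):
--     while lst:
--         if lst[0]+lst[-1] == sum(lst[1:-1]):
--             return lst
--         lst.pop(0)
--         if lst:
--             lst.pop(-1)
--     return []
-- ===== SOURCE B (Python) =====
-- def plastic_balance(lst):
--     # One pass of prefix sums, then O(1) balance check per shrink step (no mutation of lst).
--     n = len(lst)
--     S = [0]
--     for x in lst:
--         S.append(S[-1] + x)
--     i = 0
--     while n - 2 * i > 0:
--         if lst[i] + lst[n - 1 - i] == S[n - 1 - i] - S[i + 1]: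
--             return lst[i:n - i]
--         i += 1
--     return []
-- ===== Notes on version B (the rewrite author's own statement) =====
-- stated objective: faster
-- what changed: B precomputes prefix sums once and checks each shrink step in O(1) by index arithmetic instead of re-summing the middle slice and popping from both ends; B does not mutate the input (the equivalence is about the return value).
import Mathlib
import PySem

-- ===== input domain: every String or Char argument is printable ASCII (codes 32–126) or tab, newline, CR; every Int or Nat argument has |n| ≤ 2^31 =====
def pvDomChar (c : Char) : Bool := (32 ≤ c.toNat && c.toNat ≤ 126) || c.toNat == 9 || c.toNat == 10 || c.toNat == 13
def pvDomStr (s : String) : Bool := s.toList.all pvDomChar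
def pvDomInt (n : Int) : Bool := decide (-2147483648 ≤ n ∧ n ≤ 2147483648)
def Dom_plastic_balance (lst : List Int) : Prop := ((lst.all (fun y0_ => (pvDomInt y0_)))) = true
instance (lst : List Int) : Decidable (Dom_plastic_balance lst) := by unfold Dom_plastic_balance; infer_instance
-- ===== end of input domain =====

-- B finds the same balanced window via prefix sums, O(1) per shrink step; A mutates its
-- argument in place (pops both ends) while B does not — the equivalence is about the return value.

-- ===== PORT A =====
-- while lst: if lst[0]+lst[-1]==sum(lst[1:-1]): return lst; lst.pop(0); if lst: lst.pop(-1)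
def plastic_balance (lst : List Int) : List Int :=
  match lst with
  | [] => []
  | a :: rest =>
      if a + (a :: rest).getLast (by simp) = (PySem.List.slice (a :: rest) (some 1) (some (-1))).sum
      then a :: rest
      else plastic_balance rest.dropLast
termination_by lst.length
decreasing_by simp

-- ===== PORT B =====
-- S = [0]; for x in lst: S.append(S[-1]+x)   (running prefix sums, built front to back)
def pbPrefix (s : Int) : List Int → List Int
  | [] => [s]
  | x :: xs => s :: pbPrefix (s + x) xs

-- while n-2*i > 0: if lst[i]+lst[n-1-i]==S[n-1-i]-S[i+1]: return lst[i:n-i]; i += 1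
def pbLoop (lst S : List Int) (n i : Nat) : List Int :=
  if n - 2 * i > 0 then
    if lst.getD i 0 + lst.getD (n - 1 - i) 0 = S.getD (n - 1 - i) 0 - S.getD (i + 1) 0
    then PySem.List.slice lst (some (i : Int)) (some ((n - i : Nat) : Int))
    else pbLoop lst S n (i + 1)
  else []
termination_by n - 2 * i
decreasing_by omega

def plastic_balance_alt (lst : List Int) : List Int :=
  pbLoop lst (pbPrefix 0 lst) lst.length 0

-- ===== PRECONDITION & SPEC =====
def Spec_plastic_balance (lst : List Int) (out : List Int) : Prop := out = plastic_balance_alt lst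
instance (lst : List Int) (out : List Int) : Decidable (Spec_plastic_balance lst out) := by unfold Spec_plastic_balance; infer_instance

-- ===== CLAIM (what is proved, stated in full; the proofs are below) =====
def Claim_equal_plastic_balance : Prop := ∀ (lst : List Int), Dom_plastic_balance lst → Spec_plastic_balance lst (plastic_balance lst)

-- ===== LEMMAS AND PROOFS =====

-- lst[1:-1] of a nonempty list is tail-then-dropLast
lemma slice_one_neg_one (a : Int) (rest : List Int) :
    PySem.List.slice (a :: rest) (some 1) (some (-1)) = rest.dropLast := by
  simp [PySem.List.slice, PySem.List.clampIdx, List.dropLast_eq_take]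
  split_ifs <;> omega

-- S[j] = s + sum of the first j elements (for j ≤ length)
lemma pbPrefix_getD (s : Int) (l : List Int) (j : Nat) (hj : j ≤ l.length) :
    (pbPrefix s l).getD j 0 = s + (l.take j).sum := by
  induction l generalizing s j with
  | nil => simp at hj; subst hj; simp [pbPrefix]
  | cons x xs ih =>
    cases j with
    | zero => simp [pbPrefix]
    | succ j =>
      simp only [pbPrefix, List.getD_cons_succ, List.take_succ_cons, List.sum_cons]
      rw [ih _ _ (by simpa using hj)]; ring

lemma sum_drop_take (l : List Int) (a b : Nat) :
    ((l.drop a).take b).sum = (l.take (a + b)).sum - (l.take a).sum := by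
  rw [List.take_add]; simp

lemma sum_take_succ (l : List Int) (j : Nat) (h : j < l.length) :
    (l.take (j + 1)).sum = (l.take j).sum + l.getD j 0 := by
  rw [List.take_succ_eq_append_getElem h, List.getD_eq_getElem l 0 h, List.sum_append,
    List.sum_cons, List.sum_nil, add_zero]

lemma head_window (lst : List Int) (i k : Nat) (hk : 0 < k) :
    ((lst.drop i).take k).getD 0 0 = lst.getD i 0 := by
  rw [List.getD_eq_getElem?_getD, List.getD_eq_getElem?_getD]
  simp [List.getElem?_drop, hk]

lemma getlast_window (lst : List Int) (i : Nat) (a : Int) (rest : List Int)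
    (hw : (lst.drop i).take (lst.length - 2 * i) = a :: rest) (hk : 0 < lst.length - 2 * i) :
    (a :: rest).getLast (by simp) = lst.getD (lst.length - 1 - i) 0 := by
  have hlen : (a :: rest).length = lst.length - 2 * i := by
    rw [← hw]; simp; omega
  have key : ((lst.drop i).take (lst.length - 2 * i))[(lst.length - 2 * i) - 1]? =
      lst[lst.length - 1 - i]? := by
    simp only [List.getElem?_take, List.getElem?_drop]
    rw [if_pos (by omega)]
    congr 1; omega
  rw [hw] at key
  rw [← hlen] at key
  rw [List.getLast_eq_getElem, List.getD_eq_getElem?_getD, ← key]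
  simp
  rfl

-- the window step: lst[i+1 : n-(i+1)] = tail.dropLast of lst[i : n-i]
lemma window_step (lst : List Int) (i : Nat) :
    ((lst.drop (i + 1)).take (lst.length - 2 * (i + 1))) =
      (((lst.drop i).take (lst.length - 2 * i)).tail).dropLast := by
  apply List.ext_getElem?
  intro j
  rw [← List.drop_one, List.drop_take]
  simp [List.getElem?_take, List.getElem?_drop, List.getElem?_dropLast, List.length_take]
  split_ifs <;> (try rfl) <;> omega

lemma main_lemma (lst : List Int) (i : Nat) :
    pbLoop lst (pbPrefix 0 lst) lst.length i =
      plastic_balance ((lst.drop i).take (lst.length - 2 * i)) := by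
  suffices H : ∀ k i, lst.length - 2 * i = k →
      pbLoop lst (pbPrefix 0 lst) lst.length i =
        plastic_balance ((lst.drop i).take (lst.length - 2 * i)) from H _ i rfl
  intro k
  induction k using Nat.strong_induction_on with
  | _ k ih =>
    intro i hk
    rw [pbLoop]
    by_cases hpos : lst.length - 2 * i > 0
    · rw [if_pos hpos]
      have hi : i < lst.length := by omega
      have hlen : ((lst.drop i).take (lst.length - 2 * i)).length = lst.length - 2 * i := by
        simp; omega
      cases hw : (lst.drop i).take (lst.length - 2 * i) with
      | nil => rw [hw] at hlen; simp at hlen; omega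
      | cons a rest =>
        rw [hw] at hlen
        rw [plastic_balance.eq_def]
        simp only []
        rw [slice_one_neg_one]
        have ha : lst.getD i 0 = a := by
          have h0 := head_window lst i (lst.length - 2 * i) hpos
          rw [hw] at h0; simpa using h0.symm
        have hlast := getlast_window lst i a rest hw hpos
        have hS1 : (pbPrefix 0 lst).getD (lst.length - 1 - i) 0 =
            (lst.take (lst.length - 1 - i)).sum := by
          rw [pbPrefix_getD 0 lst _ (by omega)]; ring
        have hS2 : (pbPrefix 0 lst).getD (i + 1) 0 = (lst.take (i + 1)).sum := by
          rw [pbPrefix_getD 0 lst _ (by omega)]; ring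
        have hws := window_step lst i
        rw [hw] at hws
        simp only [List.tail_cons] at hws
        -- hws : (lst.drop (i+1)).take (lst.length - 2*(i+1)) = rest.dropLast
        have hceq : (lst.getD i 0 + lst.getD (lst.length - 1 - i) 0 =
              (pbPrefix 0 lst).getD (lst.length - 1 - i) 0 - (pbPrefix 0 lst).getD (i + 1) 0)
            ↔ (a + (a :: rest).getLast (by simp) = rest.dropLast.sum) := by
          rw [hS1, hS2, ha, hlast]
          by_cases h2 : lst.length - 2 * i = 1
          · have hii : lst.length - 1 - i = i := by omega
            have hrest : rest = [] := by
              simp at hlen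
              exact List.eq_nil_of_length_eq_zero (by omega)
            subst hrest
            have hsum := sum_take_succ lst i (by omega)
            rw [hii] at *
            simp only [List.dropLast_nil, List.sum_nil]
            rw [ha]
            constructor <;> intro h <;> omega
          · rw [← hws, sum_drop_take]
            have : i + 1 + (lst.length - 2 * (i + 1)) = lst.length - 1 - i := by omega
            rw [this]
        by_cases hc : lst.getD i 0 + lst.getD (lst.length - 1 - i) 0 =
            (pbPrefix 0 lst).getD (lst.length - 1 - i) 0 - (pbPrefix 0 lst).getD (i + 1) 0
        · rw [if_pos hc, if_pos (hceq.mp hc)]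
          rw [PySem.List.slice_natCast]
          rw [show lst.length - i - i = lst.length - 2 * i by omega, hw]
        · rw [if_neg hc, if_neg (fun h => hc (hceq.mpr h))]
          rw [ih (lst.length - 2 * (i + 1)) (by omega) (i + 1) rfl, hws]
    · rw [if_neg hpos]
      have : lst.length - 2 * i = 0 := by omega
      rw [this]
      simp [plastic_balance]

-- ===== VERDICT (by name: the statement is the Claim_ definition above) =====
theorem plastic_balance_spec : Claim_equal_plastic_balance := by
  intro lst _
  unfold Spec_plastic_balance plastic_balance_alt
  have h := main_lemma lst 0
  simpa using h.symm
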